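-- pv_equiv track=rewrite | github.com/evan-ssh/ObjectOrientedPython | Final Exam Practice/ConsoleStore.py | serveCustomer
-- ===== SOURCE A (Python) =====
-- class Stack:
--     def __init__(self):
--         self.stack = []
--
--     def push(self, element):
--         self.stack.append(element)
--
--     def pop(self):
--         if self.isEmpty():
--             return "Stack is empty"
--         return self.stack.pop()
--
--     def peek(self):
--         if self.isEmpty():
--             return "Stack is empty"
--         return self.stack[-1]
--
--     def isEmpty(self):
--         return len(self.stack) == 0
--
--     def size(self):
--         return len(self.stack)
--
-- class Queue:
--     def __init__(self):
--         self.queue = []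
--
--     def enqueue(self, element):
--         self.queue.append(element)
--
--     def dequeue(self):
--         if self.isEmpty():
--             return "Queue is empty"
--         return self.queue.pop(0)
--
--     def peek(self):
--         if self.isEmpty():
--             return "Queue is empty"
--         return self.queue[0]
--
--     def isEmpty(self):
--         return len(self.queue) == 0
--
--     def size(self):
--         return len(self.queue)
--
-- def serveCustomer(console,customers):
--     stack = Stack()
--     queue = Queue()
--     for char in console:
--         stack.push(char)
--     for cust in customers:
--         queue.enqueue(cust)
--
--     while not queue.isEmpty() and not stack.isEmpty():
--         served = False#Used to track rotations
--         for _ in range(queue.size()):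
--             if queue.peek() == stack.peek():
--                 queue.dequeue() #Remove customer from queue
--                 stack.pop() #Remove console from stack
--                 served = True #Mark that a customer was served
--                 break
--             else:
--                 queue.enqueue(queue.dequeue()) #Move customer to back of queue 'Rotate'
--         if not served:#By the end of the rotations if served wasnt set to true break out and return remaining customers
--             break
--     return queue.size()
-- ===== SOURCE B (Python) =====
-- def serveCustomer(console, customers):
--     # Count customers as a multiset; walk the console from the end (stack top first),
--     # serving one matching customer per char, stop at the first char with no match.
--     counts = {}
--     for cust in customers:
--         counts[cust] = counts.get(cust, 0) + 1
--     remaining = len(customers)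
--     for ch in reversed(console):
--         if counts.get(ch, 0) > 0:
--             counts[ch] -= 1
--             remaining -= 1
--         else:
--             break
--     return remaining
-- ===== Notes on version B (the rewrite author's own statement) =====
-- stated objective: faster
-- what changed: Replaces the stack/queue simulation with its O(m) rotation scan per served customer by a count dictionary built once over the customers plus a single reverse pass over the console, decrementing counts and stopping at the first unmatched character.
import Mathlib
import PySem

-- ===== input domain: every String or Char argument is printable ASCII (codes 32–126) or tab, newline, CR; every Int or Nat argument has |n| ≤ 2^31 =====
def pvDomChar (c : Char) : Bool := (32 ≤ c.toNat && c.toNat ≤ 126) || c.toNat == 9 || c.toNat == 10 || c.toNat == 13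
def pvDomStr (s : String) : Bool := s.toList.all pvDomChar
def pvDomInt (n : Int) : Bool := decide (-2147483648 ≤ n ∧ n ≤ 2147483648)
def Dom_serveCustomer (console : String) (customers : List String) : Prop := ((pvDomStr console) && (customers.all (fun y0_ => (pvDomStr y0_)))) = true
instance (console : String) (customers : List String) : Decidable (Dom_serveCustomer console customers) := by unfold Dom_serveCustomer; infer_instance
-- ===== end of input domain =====

-- B replaces A's queue-rotation simulation by a customer-count dictionary and one reverse
-- pass over the console: asymptotically faster, same return value everywhere.

-- ===== PORT A =====
-- one pass of 'for _ in range(queue.size())': rotate the queue looking for the stack top;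
-- returns the queue after the pass and the 'served' flag
def serveRot (n : Nat) (q : List String) (top : String) : List String × Bool :=
  match n, q with
  | 0, q => (q, false)
  | _ + 1, [] => ([], false)           -- unreachable: n never exceeds the queue length
  | n + 1, c :: rest =>
      if c = top then (rest, true)     -- queue.dequeue(); served = True; break
      else serveRot n (rest ++ [c]) top -- queue.enqueue(queue.dequeue())

-- the 'while not queue.isEmpty() and not stack.isEmpty()' loop; stack held top-first
def serveWhile : List Char → List String → Int
  | t :: stRest, c :: qRest =>
      if (serveRot (c :: qRest).length (c :: qRest) (String.singleton t)).2 then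
        serveWhile stRest (serveRot (c :: qRest).length (c :: qRest) (String.singleton t)).1
      else ((c :: qRest).length : Int)
  | _, q => (q.length : Int)

def serveCustomer (console : String) (customers : List String) : Int :=
  serveWhile console.toList.reverse customers

-- ===== PORT B =====
-- 'for ch in reversed(console)' with break, over the counts dict and remaining counter
def serveScan : List Char → PySem.Dict String Int → Int → Int
  | [], _, rem => rem
  | ch :: rest, counts, rem =>
      if counts.getD (String.singleton ch) 0 > 0 then
        serveScan rest (counts.insert (String.singleton ch) (counts.getD (String.singleton ch) 0 - 1)) (rem - 1)
      else rem

def serveCustomer_alt (console : String) (customers : List String) : Int :=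
  let counts := customers.foldl (fun d c => d.insert c (d.getD c 0 + 1)) PySem.Dict.empty
  serveScan console.toList.reverse counts (customers.length : Int)

-- ===== PRECONDITION & SPEC =====
def Spec_serveCustomer (console : String) (customers : List String) (out : Int) : Prop := out = serveCustomer_alt console customers
instance (console : String) (customers : List String) (out : Int) : Decidable (Spec_serveCustomer console customers out) := by unfold Spec_serveCustomer; infer_instance

-- ===== CLAIM (what is proved, stated in full; the proofs are below) =====
def Claim_equal_serveCustomer : Prop := ∀ (console : String) (customers : List String), Dom_serveCustomer console customers → Spec_serveCustomer console customers (serveCustomer console customers)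

-- ===== LEMMAS AND PROOFS =====

-- one rotation pass: the served flag is membership in the scanned prefix, and the
-- resulting queue is a permutation of the queue with the matched element erased
theorem serveRot_spec (top : String) : ∀ (n : Nat) (q : List String), n ≤ q.length →
    (serveRot n q top).2 = decide (top ∈ q.take n) ∧
    List.Perm (serveRot n q top).1 (if top ∈ q.take n then q.erase top else q) := by
  intro n
  induction n with
  | zero => intro q _; simp [serveRot]
  | succ n ih =>
    intro q hn
    match q with
    | [] => simp at hn
    | c :: rest =>
      by_cases hc : c = top
      · subst hc
        simp [serveRot, List.erase_cons_head]
      · have hlen : n ≤ (rest ++ [c]).length := by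
          simp at hn ⊢; omega
        have h := ih (rest ++ [c]) hlen
        have htake : (rest ++ [c]).take n = rest.take n := by
          apply List.take_append_of_le_length
          simpa using Nat.lt_succ_iff.mp (by simpa using hn)
        rw [htake] at h
        have hres : serveRot (n + 1) (c :: rest) top = serveRot n (rest ++ [c]) top := by
          simp [serveRot, hc]
        rw [hres]
        constructor
        · rw [h.1]
          simp [List.take_succ_cons, Ne.symm hc]
        · refine h.2.trans ?_
          by_cases hm : top ∈ rest.take n
          · have hmem : top ∈ rest := List.mem_of_mem_take hm
            rw [if_pos hm, if_pos (by simp [List.take_succ_cons, hm])]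
            rw [List.erase_append_left _ hmem, List.erase_cons_tail (by simp [hc])]
            simpa using (List.perm_append_comm (l₁ := rest.erase top) (l₂ := [c]))
          · rw [if_neg hm, if_neg (by simp [List.take_succ_cons, hm, Ne.symm hc])]
            simpa using (List.perm_append_comm (l₁ := rest) (l₂ := [c]))

-- A's while loop depends on the queue only through its multiset
theorem serveWhile_perm : ∀ (st : List Char) (q q' : List String), List.Perm q q' →
    serveWhile st q = serveWhile st q' := by
  intro st
  induction st with
  | nil => intro q q' h; simp [serveWhile, h.length_eq]
  | cons t rest ih =>
    intro q q' h
    match q, q' with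
    | [], [] => rfl
    | [], c' :: qr' => exact absurd h.symm (by simp)
    | c :: qr, [] => exact absurd h (by simp)
    | c :: qr, c' :: qr' =>
      have h1 := serveRot_spec (String.singleton t) (c :: qr).length (c :: qr) le_rfl
      have h2 := serveRot_spec (String.singleton t) (c' :: qr').length (c' :: qr') le_rfl
      rw [List.take_length] at h1 h2
      show (if (serveRot (c :: qr).length (c :: qr) (String.singleton t)).2 then
              serveWhile rest (serveRot (c :: qr).length (c :: qr) (String.singleton t)).1
            else ((c :: qr).length : Int)) =
           (if (serveRot (c' :: qr').length (c' :: qr') (String.singleton t)).2 then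
              serveWhile rest (serveRot (c' :: qr').length (c' :: qr') (String.singleton t)).1
            else ((c' :: qr').length : Int))
      rw [h1.1, h2.1]
      by_cases hm : String.singleton t ∈ c :: qr
      · have hm' : String.singleton t ∈ c' :: qr' := h.mem_iff.mp hm
        rw [decide_eq_true hm, decide_eq_true hm']
        simp only [if_true]
        apply ih
        have p1 : (serveRot (c :: qr).length (c :: qr) (String.singleton t)).1.Perm
            ((c :: qr).erase (String.singleton t)) := by
          have := h1.2; rwa [if_pos hm] at this
        have p2 : (serveRot (c' :: qr').length (c' :: qr') (String.singleton t)).1.Perm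
            ((c' :: qr').erase (String.singleton t)) := by
          have := h2.2; rwa [if_pos hm'] at this
        exact (p1.trans (h.erase _)).trans p2.symm
      · have hm' : ¬ String.singleton t ∈ c' :: qr' := fun hx => hm (h.mem_iff.mpr hx)
        rw [decide_eq_false hm, decide_eq_false hm']
        simp only [Bool.false_eq_true, if_false]
        exact congrArg (fun n : Nat => (n : Int)) h.length_eq

-- bridge: A's loop equals B's scan whenever the dict holds the queue's multiset counts
theorem serveWhile_eq_serveScan : ∀ (st : List Char) (q : List String)
    (d : PySem.Dict String Int) (rem : Int),
    (∀ s, d.getD s 0 = (q.count s : Int)) → rem = (q.length : Int) →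
    serveWhile st q = serveScan st d rem := by
  intro st
  induction st with
  | nil => intro q d rem _ hrem; simp [serveWhile, serveScan, hrem]
  | cons t rest ih =>
    intro q d rem hd hrem
    match q with
    | [] =>
      have hz : ¬ d.getD (String.singleton t) 0 > 0 := by
        rw [hd]; simp
      simp only [serveWhile, serveScan, hz, if_neg, not_false_iff]
      simpa using hrem.symm
    | c :: qr =>
      have h1 := serveRot_spec (String.singleton t) (c :: qr).length (c :: qr) le_rfl
      rw [List.take_length] at h1
      show (if (serveRot (c :: qr).length (c :: qr) (String.singleton t)).2 then
              serveWhile rest (serveRot (c :: qr).length (c :: qr) (String.singleton t)).1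
            else ((c :: qr).length : Int)) =
           serveScan (t :: rest) d rem
      by_cases hm : String.singleton t ∈ c :: qr
      · have hcnt : (c :: qr).count (String.singleton t) > 0 := List.count_pos_iff.mpr hm
        have hpos : d.getD (String.singleton t) 0 > 0 := by
          rw [hd]; exact_mod_cast hcnt
        rw [h1.1, decide_eq_true hm]
        simp only [serveScan, hpos, if_true]
        have p1 : (serveRot (c :: qr).length (c :: qr) (String.singleton t)).1.Perm
            ((c :: qr).erase (String.singleton t)) := by
          have := h1.2; rwa [if_pos hm] at this
        rw [serveWhile_perm rest _ _ p1]
        apply ih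
        · intro s
          rw [PySem.Dict.getD_insert]
          by_cases hs : s = String.singleton t
          · subst hs
            rw [if_pos rfl, hd, List.count_erase_self]
            omega
          · rw [if_neg hs, hd, List.count_erase_of_ne hs]
        · rw [hrem, List.length_erase_of_mem hm]
          have hl : 1 ≤ (c :: qr).length := by simp
          omega
      · have hz : ¬ d.getD (String.singleton t) 0 > 0 := by
          rw [hd]
          simp [List.count_eq_zero_of_not_mem hm]
        rw [h1.1, decide_eq_false hm]
        simp only [serveScan, hz, if_neg, not_false_iff, Bool.false_eq_true]
        exact hrem.symm

-- ===== VERDICT (by name: the statement is the Claim_ definition above) =====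
theorem serveCustomer_spec : Claim_equal_serveCustomer := by
  intro console customers _
  unfold Spec_serveCustomer serveCustomer serveCustomer_alt
  rw [PySem.Dict.foldl_insert_getD_add_one_eq_counter]
  exact serveWhile_eq_serveScan _ _ _ _
    (fun s => PySem.Dict.getD_counter customers s) rfl
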